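-- pv_equiv track=rewrite | github.com/Embi/euler | problems/problem_054/solution.py | eval_pairs
-- ===== SOURCE A (Python) =====
-- from typing import List, Tuple
-- from itertools import groupby
--
-- def by_value(hand: List[str]) -> List[Tuple[str, Tuple[int]]]:
--     hand = sorted(hand, key=lambda card: card[0])
--     return [(k, tuple(g)) for k, g in groupby(hand, lambda x: x[0])]
--
-- def eval_pairs(hand: List[str]) -> Tuple[str, str]:
--     shift = '0' * 5
--     pairs = filter(lambda x: len(x[1]) == 2, by_value(hand))
--     values = []
--     for value, cards in pairs:
--         values += value
--         for card in cards:
--             hand.remove(card)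
--     values.sort(reverse=True)
--     return hand, ''.join(values).zfill(2) + shift
-- ===== SOURCE B (Python) =====
-- def eval_pairs(hand):
--     # One pass to count cards per value char; no sorting of the hand, no groupby.
--     counts = {}
--     for card in hand:
--         counts[card[0]] = counts.get(card[0], 0) + 1
--     values = sorted((v for v, c in counts.items() if c == 2), reverse=True)
--     hand[:] = [card for card in hand if counts[card[0]] != 2]
--     return hand, ''.join(values).zfill(2) + '0' * 5
-- ===== Notes on version B (the rewrite author's own statement) =====
-- stated objective: idiomatic
-- what changed: Replaces sort+itertools.groupby and per-card hand.remove scans with a single counting pass over the hand (dict value-char -> count), selecting value chars with count exactly 2 and rebuilding the kept hand with one filter.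
import Mathlib
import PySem

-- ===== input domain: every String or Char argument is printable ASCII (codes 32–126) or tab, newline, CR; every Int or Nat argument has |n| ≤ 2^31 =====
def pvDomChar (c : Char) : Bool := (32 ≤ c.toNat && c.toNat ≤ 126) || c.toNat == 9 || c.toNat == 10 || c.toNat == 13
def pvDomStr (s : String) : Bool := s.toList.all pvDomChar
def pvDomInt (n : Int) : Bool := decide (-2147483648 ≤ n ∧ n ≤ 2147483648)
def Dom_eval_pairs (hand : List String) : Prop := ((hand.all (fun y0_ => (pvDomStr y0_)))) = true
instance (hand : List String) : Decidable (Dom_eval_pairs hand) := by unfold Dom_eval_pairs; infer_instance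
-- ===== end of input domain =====

-- B replaces A's sort+groupby+per-card remove with one counting pass over the hand and a filter.
-- A mutates `hand` in place (remove); B mutates it via slice assignment — the theorems below are about the returned value
-- (which in both Pythons is the same object/value as the mutated hand).

-- ===== PORT A =====
-- card[0]; the none case (IndexError on an empty card string) is excluded by Pre_eval_pairs
def pvKey (card : String) : Char := (PySem.Str.pyGet? card 0).getD ' '

-- itertools.groupby over the sorted list, keyed by card[0] (hand-written; exact for any input list)
def pvGroupby (l : List String) : List (Char × List String) :=
  match l with
  | [] => []
  | c :: rest =>
    (pvKey c, c :: rest.takeWhile (fun x => pvKey x == pvKey c)) ::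
      pvGroupby (rest.dropWhile (fun x => pvKey x == pvKey c))
  termination_by l.length
  decreasing_by
    simp only [List.length_cons]
    exact Nat.lt_succ_of_le (List.length_dropWhile_le _ _)

def by_value (hand : List String) : List (Char × List String) :=
  pvGroupby (PySem.List.sorted hand (fun card => pvKey card))

def eval_pairs (hand : List String) : List String × String :=
  -- shift = '0' * 5
  let shift : List Char := List.replicate 5 '0'
  let pairs := (by_value hand).filter (fun x => x.2.length == 2)
  -- for value, cards in pairs: values += value; for card in cards: hand.remove(card)
  -- hand.remove(card): the card is always present here, so remove? never returns none (the getD is unreachable)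
  let st := pairs.foldl
    (fun (st : List String × List Char) p =>
      (p.2.foldl (fun h card => (PySem.List.remove? h card).getD h) st.1, st.2 ++ [p.1]))
    (hand, [])
  -- values.sort(reverse=True); ''.join(values).zfill(2) + shift  (values are one-char strings = chars)
  let values := PySem.List.sorted st.2 (fun v => v) true
  (st.1, String.ofList (PySem.Chars.zfill values 2 ++ shift))

-- ===== PORT B =====
def eval_pairs_alt (hand : List String) : List String × String :=
  -- counts[card[0]] = counts.get(card[0], 0) + 1
  let counts := hand.foldl
    (fun (d : PySem.Dict Char Int) card => d.insert (pvKey card) (d.getD (pvKey card) 0 + 1))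
    PySem.Dict.empty
  -- values = sorted((v for v, c in counts.items() if c == 2), reverse=True)
  let values := PySem.List.sorted ((counts.items.filter (fun p => p.2 == 2)).map (fun p => p.1)) (fun v => v) true
  -- hand[:] = [card for card in hand if counts[card[0]] != 2]
  let kept := hand.filter (fun card => !(counts.getD (pvKey card) 0 == 2))
  (kept, String.ofList (PySem.Chars.zfill values 2 ++ List.replicate 5 '0'))

-- ===== PRECONDITION & SPEC =====
-- Pre_ excludes hands containing an empty string, on which A (and B) raise IndexError at card[0].
def Pre_eval_pairs (hand : List String) : Prop := ∀ s ∈ hand, s ≠ ""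
instance (hand : List String) : Decidable (Pre_eval_pairs hand) := by unfold Pre_eval_pairs; infer_instance
def pvWitness_eval_pairs : List String := ["5H", "5C", "6S", "7S", "KD"]

def Spec_eval_pairs (hand : List String) (out : List String × String) : Prop := out = eval_pairs_alt hand
instance (hand : List String) (out : List String × String) : Decidable (Spec_eval_pairs hand out) := by unfold Spec_eval_pairs; infer_instance

-- ===== CLAIM (what is proved, stated in full; the proofs are below) =====
def Claim_equal_eval_pairs : Prop := ∀ (hand : List String), Dom_eval_pairs hand → Pre_eval_pairs hand → Spec_eval_pairs hand (eval_pairs hand)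

-- ===== LEMMAS AND PROOFS =====

-- every element of the takeWhile-prefix of a group shares the group's key
theorem pv_key_takeWhile {c x : String} {rest : List String}
    (hx : x ∈ rest.takeWhile (fun y => pvKey y == pvKey c)) : pvKey x = pvKey c := by
  simpa using List.mem_takeWhile_imp hx

-- on a key-sorted list, everything after the leading key-block has a strictly larger key
theorem pv_key_dropWhile {c : String} {rest : List String}
    (hs : rest.Pairwise (fun a b => pvKey a ≤ pvKey b))
    (hge : ∀ x ∈ rest, pvKey c ≤ pvKey x) {x : String}
    (hx : x ∈ rest.dropWhile (fun y => pvKey y == pvKey c)) : pvKey c < pvKey x := by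
  have hdsub : (rest.dropWhile (fun y => pvKey y == pvKey c)).Sublist rest :=
    List.dropWhile_sublist _
  have h0 := List.head?_dropWhile_not (fun y => pvKey y == pvKey c) rest
  cases hdd : rest.dropWhile (fun y => pvKey y == pvKey c) with
  | nil => rw [hdd] at hx; simp at hx
  | cons y d' =>
    rw [hdd] at hx hdsub h0
    simp only [List.head?_cons] at h0
    have hy : pvKey y ≠ pvKey c := by simpa using h0
    have hymem : y ∈ rest := hdsub.mem List.mem_cons_self
    have hylt : pvKey c < pvKey y := lt_of_le_of_ne (hge y hymem) (Ne.symm hy)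
    rcases List.mem_cons.mp hx with rfl | hx'
    · exact hylt
    · have hpd : (y :: d').Pairwise (fun a b => pvKey a ≤ pvKey b) :=
        List.Pairwise.sublist hdsub hs
      exact lt_of_lt_of_le hylt ((List.pairwise_cons.mp hpd).1 x hx')

-- itertools.groupby on a key-sorted list: keys strictly increase, each group is the
-- key's filter of the whole list, and the group keys are exactly the keys occurring
theorem pvGroupby_spec (l : List String)
    (hs : l.Pairwise (fun a b => pvKey a ≤ pvKey b)) :
    ((pvGroupby l).map Prod.fst).Pairwise (· < ·)
    ∧ (∀ p ∈ pvGroupby l, p.2 = l.filter (fun x => pvKey x == p.1))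
    ∧ (∀ k, k ∈ (pvGroupby l).map Prod.fst ↔ k ∈ l.map pvKey) := by
  induction l using pvGroupby.induct with
  | case1 => simp [pvGroupby]
  | case2 c rest ih =>
    have htail : rest.Pairwise (fun a b => pvKey a ≤ pvKey b) := (List.pairwise_cons.mp hs).2
    have hge : ∀ x ∈ rest, pvKey c ≤ pvKey x := (List.pairwise_cons.mp hs).1
    set t := rest.takeWhile (fun y => pvKey y == pvKey c) with ht
    set d := rest.dropWhile (fun y => pvKey y == pvKey c) with hd
    have hdsorted : d.Pairwise (fun a b => pvKey a ≤ pvKey b) :=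
      List.Pairwise.sublist (List.dropWhile_sublist _) htail
    have hdgt : ∀ x ∈ d, pvKey c < pvKey x := fun x hx => pv_key_dropWhile htail hge hx
    obtain ⟨ihp, ihf, ihm⟩ := ih hdsorted
    have hrest : t ++ d = rest := List.takeWhile_append_dropWhile
    -- the filter of the whole list at the head key is exactly the head block
    have hfilter_c : (c :: rest).filter (fun x => pvKey x == pvKey c) = c :: t := by
      conv_lhs => rw [← hrest]
      rw [List.filter_cons, List.filter_append,
          List.filter_eq_self.mpr (fun x hx => by simpa using pv_key_takeWhile hx),
          List.filter_eq_nil_iff.mpr (fun x hx => by simpa using ne_of_gt (hdgt x hx))]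
      have hcc : (pvKey c == pvKey c) = true := by simp
      rw [if_pos hcc, List.append_nil]
    -- for a later key, head and its block contribute nothing to the filter
    have hfilter_gt : ∀ k, pvKey c < k →
        (c :: rest).filter (fun x => pvKey x == k) = d.filter (fun x => pvKey x == k) := by
      intro k hk
      conv_lhs => rw [← hrest]
      simp only [List.filter_cons, List.filter_append]
      rw [if_neg (by simpa using ne_of_lt hk),
          List.filter_eq_nil_iff.mpr (fun x hx => by
            simpa [pv_key_takeWhile hx] using ne_of_lt hk)]
      simp
    have hkey_d_gt : ∀ k ∈ (pvGroupby d).map Prod.fst, pvKey c < k := by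
      intro k hk
      obtain ⟨x, hx, rfl⟩ := List.mem_map.mp ((ihm k).mp hk)
      exact hdgt x hx
    refine ⟨?_, ?_, ?_⟩
    · rw [pvGroupby]
      simp only [List.map_cons]
      exact List.pairwise_cons.mpr ⟨hkey_d_gt, ihp⟩
    · intro p hp
      rw [pvGroupby] at hp
      rcases List.mem_cons.mp hp with rfl | hp'
      · simpa using hfilter_c.symm
      · have hkmem : p.1 ∈ (pvGroupby d).map Prod.fst := List.mem_map_of_mem hp'
        rw [ihf p hp', ← hfilter_gt p.1 (hkey_d_gt p.1 hkmem)]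
    · intro k
      rw [pvGroupby]
      simp only [List.map_cons, List.mem_cons]
      have hsplit : k ∈ List.map pvKey rest ↔ k ∈ List.map pvKey t ∨ k ∈ List.map pvKey d := by
        conv_lhs => rw [← hrest]
        simp [List.map_append]
      rw [ihm k, hsplit]
      constructor
      · rintro (rfl | hk)
        · exact Or.inl rfl
        · exact Or.inr (Or.inr hk)
      · rintro (rfl | hk | hk)
        · exact Or.inl rfl
        · obtain ⟨x, hx, rfl⟩ := List.mem_map.mp hk
          exact Or.inl (pv_key_takeWhile hx)
        · exact Or.inr hk

-- removing, one by one, a permutation of all key-k cards leaves the not-key-k cards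
theorem pv_remove_one_group (k : Char) :
    ∀ (g h : List String), g.Perm (h.filter (fun x => pvKey x == k)) →
    g.foldl (fun h card => (PySem.List.remove? h card).getD h) h
      = h.filter (fun x => !(pvKey x == k)) := by
  intro g
  induction g with
  | nil =>
    intro h hperm
    have hnil : h.filter (fun x => pvKey x == k) = [] := hperm.symm.eq_nil
    simp only [List.foldl_nil]
    exact (List.filter_eq_self.mpr (fun x hx => by
      have := List.filter_eq_nil_iff.mp hnil x hx
      simpa using this)).symm
  | cons c g' ih =>
    intro h hperm
    have hcmem : c ∈ h.filter (fun x => pvKey x == k) := hperm.mem_iff.mp List.mem_cons_self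
    have hcin : c ∈ h := List.mem_of_mem_filter hcmem
    have hck : (pvKey c == k) = true := (List.mem_filter.mp hcmem).2
    simp only [List.foldl_cons, PySem.List.remove?_eq_some_erase h c hcin, Option.getD_some]
    have hg' : g'.Perm ((h.erase c).filter (fun x => pvKey x == k)) := by
      rw [← List.erase_filter]
      exact (hperm.trans (List.perm_cons_erase hcmem)).cons_inv
    rw [ih (h.erase c) hg', ← List.erase_filter,
        List.erase_of_not_mem (by
          intro hmem
          have := (List.mem_filter.mp hmem).2
          simp [hck] at this)]

-- removing, group after group (distinct keys), leaves the cards whose key is in no group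
theorem pv_remove_groups :
    ∀ (ps : List (Char × List String)) (h : List String),
    (ps.map Prod.fst).Nodup →
    (∀ p ∈ ps, p.2.Perm (h.filter (fun x => pvKey x == p.1))) →
    ps.foldl (fun h p => p.2.foldl (fun h card => (PySem.List.remove? h card).getD h) h) h
      = h.filter (fun x => !(decide (pvKey x ∈ ps.map Prod.fst))) := by
  intro ps
  induction ps with
  | nil => intro h _ _; simp
  | cons q ps' ih =>
    intro h hnd hperm
    simp only [List.foldl_cons]
    rw [pv_remove_one_group q.1 q.2 h (hperm q List.mem_cons_self)]
    rw [List.map_cons, List.nodup_cons] at hnd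
    obtain ⟨hk_not, hnd_tail⟩ := hnd
    have hps' : ∀ p ∈ ps',
        p.2.Perm ((h.filter (fun x => !(pvKey x == q.1))).filter (fun x => pvKey x == p.1)) := by
      intro p hp
      rw [List.filter_filter]
      have heq : (fun x => (pvKey x == p.1) && !(pvKey x == q.1)) = (fun x => pvKey x == p.1) := by
        funext x
        by_cases hx : pvKey x = p.1
        · have hne : p.1 ≠ q.1 := by
            intro hcontra; exact hk_not (hcontra ▸ List.mem_map_of_mem hp)
          simp [hx, hne]
        · simp [hx]
      rw [heq]
      exact hperm p (List.mem_cons_of_mem _ hp)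
    rw [ih _ hnd_tail hps', List.filter_filter]
    simp only [List.map_cons]
    apply List.filter_congr
    intro x _
    by_cases hq : pvKey x = q.1
    · simp [hq]
    · have hb : (pvKey x == q.1) = false := beq_eq_false_iff_ne.mpr hq
      have h1 : (pvKey x ∈ q.1 :: List.map Prod.fst ps') = (pvKey x ∈ List.map Prod.fst ps') := by
        simp [List.mem_cons, hq]
      rw [hb]
      simp only [Bool.not_false, Bool.and_true]
      exact congrArg (fun b => !b)
        (decide_eq_decide.mpr (by simp [List.mem_cons, hq])).symm

theorem pv_count_filter_key (l : List String) (k : Char) :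
    (l.filter (fun x => pvKey x == k)).length = (l.map pvKey).count k := by
  rw [← List.countP_eq_length_filter, List.count_eq_countP, List.countP_map]
  rfl

-- ===== VERDICT (by name: the statement is the Claim_ definition above) =====
theorem eval_pairs_spec : Claim_equal_eval_pairs := by
  intro hand _ _
  unfold Spec_eval_pairs eval_pairs eval_pairs_alt by_value
  dsimp only
  set l := PySem.List.sorted hand (fun card => pvKey card) with hl
  have hlperm : l.Perm hand := PySem.List.sorted_perm hand _ false
  have hs : l.Pairwise (fun a b => pvKey a ≤ pvKey b) := PySem.List.sorted_pairwise hand _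
  obtain ⟨hGp, hGf, hGm⟩ := pvGroupby_spec l hs
  set G := pvGroupby l with hG
  set pairs := G.filter (fun x => x.2.length == 2) with hpairs
  set K := hand.map pvKey with hK
  have hKperm : (l.map pvKey).Perm K := hlperm.map pvKey
  -- A's loop: two independent accumulators
  rw [PySem.List.foldl_prod_mk
        (f := fun h (p : Char × List String) =>
          p.2.foldl (fun h card => (PySem.List.remove? h card).getD h) h)
        (g := fun (vs : List Char) (p : Char × List String) => vs ++ [p.1])]
  rw [PySem.List.foldl_append_singleton_eq_map]
  simp only [List.nil_append]
  -- B's counter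
  rw [show (fun (d : PySem.Dict Char Int) card => d.insert (pvKey card) (d.getD (pvKey card) 0 + 1))
        = (fun d card => (fun (d : PySem.Dict Char Int) x => d.insert x (d.getD x 0 + 1)) d (pvKey card)) from rfl,
      ← List.foldl_map (f := pvKey)
        (g := fun (d : PySem.Dict Char Int) x => d.insert x (d.getD x 0 + 1)),
      PySem.Dict.foldl_insert_getD_add_one_eq_counter]
  set keysA := pairs.map Prod.fst with hkeysA
  -- membership characterisation of A's pair keys
  have hmemA : ∀ k, k ∈ keysA ↔ (k ∈ K ∧ K.count k = 2) := by
    intro k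
    constructor
    · intro hk
      obtain ⟨p, hp, rfl⟩ := List.mem_map.mp hk
      have hpG : p ∈ G := List.mem_of_mem_filter hp
      have hlen : p.2.length = 2 := by simpa using (List.mem_filter.mp hp).2
      have hcnt : (l.map pvKey).count p.1 = 2 := by
        rw [← pv_count_filter_key, ← hGf p hpG]; exact hlen
      exact ⟨hKperm.mem_iff.mp (by
          rw [← hGm]; exact List.mem_map_of_mem hpG),
        by rw [← hKperm.count_eq]; exact hcnt⟩
    · rintro ⟨hkK, hcnt⟩
      have hkl : k ∈ (pvGroupby l).map Prod.fst := (hGm k).mpr (hKperm.mem_iff.mpr hkK)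
      obtain ⟨p, hpG, rfl⟩ := List.mem_map.mp hkl
      have hlen : p.2.length = 2 := by
        rw [hGf p hpG, pv_count_filter_key, hKperm.count_eq]; exact hcnt
      exact List.mem_map_of_mem (List.mem_filter.mpr ⟨hpG, by simpa using hlen⟩)
  -- B's pair keys
  rw [PySem.Dict.items_counter, List.filter_map, List.map_map]
  set valsB := ((PySem.Set.ofList K).filter
      ((fun (p : Char × Int) => p.2 == 2) ∘ fun k => (k, (K.count k : Int)))).map
      (Prod.fst ∘ fun k => (k, (K.count k : Int))) with hvalsB
  have hvalsB' : valsB = (PySem.Set.ofList K).filter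
      (fun k => ((K.count k : Int) == 2)) := by
    rw [hvalsB]
    have : (Prod.fst ∘ fun (k : Char) => (k, (K.count k : Int))) = id := rfl
    rw [this, List.map_id]
    rfl
  have hmemB : ∀ k, k ∈ valsB ↔ (k ∈ K ∧ K.count k = 2) := by
    intro k
    rw [hvalsB', List.mem_filter, PySem.Set.mem_ofList]
    constructor
    · rintro ⟨h1, h2⟩
      refine ⟨h1, ?_⟩
      have := beq_iff_eq.mp h2
      exact_mod_cast this
    · rintro ⟨h1, h2⟩; exact ⟨h1, by simp [h2]⟩
  have hNodupA : keysA.Nodup := by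
    have hsub : keysA.Sublist (G.map Prod.fst) := List.filter_sublist.map _
    exact (List.Pairwise.sublist hsub hGp).imp ne_of_lt
  have hNodupB : valsB.Nodup := by
    rw [hvalsB']; exact (PySem.Set.nodup_ofList K).filter _
  have hpermAB : keysA.Perm valsB :=
    (List.perm_ext_iff_of_nodup hNodupA hNodupB).mpr (fun a => by rw [hmemA, hmemB])
  -- the two descending-sorted pair-value lists agree
  have hsorted_eq : PySem.List.sorted keysA (fun v => v) true
      = PySem.List.sorted valsB (fun v => v) true := by
    have hperm : (PySem.List.sorted keysA (fun v => v) true).Perm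
        (PySem.List.sorted valsB (fun v => v) true) :=
      ((PySem.List.sorted_perm keysA _ true).trans hpermAB).trans
        (PySem.List.sorted_perm valsB _ true).symm
    exact List.Perm.eq_of_pairwise
      (fun a b _ _ h1 h2 => le_antisymm h2 h1)
      (PySem.List.sorted_pairwise_rev keysA (fun v => v))
      (PySem.List.sorted_pairwise_rev valsB (fun v => v)) hperm
  -- the surviving hand
  have hhand : pairs.foldl
      (fun h p => p.2.foldl (fun h card => (PySem.List.remove? h card).getD h) h) hand
      = hand.filter (fun card => !(PySem.Dict.getD (PySem.Dict.counter K) (pvKey card) 0 == 2)) := by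
    rw [pv_remove_groups pairs hand hNodupA (fun p hp => by
      rw [hGf p (List.mem_of_mem_filter hp)]
      exact hlperm.filter _)]
    apply List.filter_congr
    intro x hx
    have hxK : pvKey x ∈ K := List.mem_map_of_mem hx
    rw [PySem.Dict.getD_counter]
    congr 1
    by_cases hc : K.count (pvKey x) = 2
    · obtain ⟨p, hp, hfst⟩ := List.mem_map.mp ((hmemA _).mpr ⟨hxK, hc⟩)
      simp [hc]
      exact ⟨p.2, by rw [← hfst]; exact hp⟩
    · have hout : pvKey x ∉ keysA := fun hmem => hc ((hmemA _).mp hmem).2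
      rw [decide_eq_false hout]
      symm
      rw [beq_eq_false_iff_ne]
      intro hcontra
      exact hc (by exact_mod_cast hcontra)
  rw [hhand, hsorted_eq]
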